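-- pv_equiv track=rewrite | github.com/KihyeokK/Gridlock-Puzzle-Game | Board.py | get_goal_blocks
-- ===== SOURCE A (Python) =====
-- def get_goal_blocks(goal):
--     '''
--     Return a dictionary containing goal blocks as keys
--     and a list of indices and directions of the goal blocks as values.
--     '''
--     goal_blocks = {}
--     for i, tile in enumerate(goal):
--         if tile != "0":
--             if tile in goal_blocks:
--                 goal_blocks[tile].append(i)
--             elif not tile in goal_blocks:
--                 goal_blocks[tile] = [i]
--
--     return goal_blocks
-- ===== SOURCE B (Python) =====
-- def get_goal_blocks(goal):
--     '''
--     Return a dictionary containing goal blocks as keys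
--     and a list of indices and directions of the goal blocks as values.
--     '''
--     keys = []
--     seen = set()
--     for tile in goal:
--         if tile != "0" and tile not in seen:
--             keys.append(tile)
--             seen.add(tile)
--     positions = {}
--     for i, tile in enumerate(goal):
--         positions.setdefault(tile, []).append(i)
--     return {tile: positions[tile] for tile in keys}
-- ===== Notes on version B (the rewrite author's own statement) =====
-- stated objective: alternative
-- what changed: B replaces A's one-pass dict with per-element membership branching by a three-phase decomposition: collect the distinct nonzero tiles with a seen-set, group all indices by tile in one setdefault pass, then assemble the result with a comprehension over the collected keys.
import Mathlib
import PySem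

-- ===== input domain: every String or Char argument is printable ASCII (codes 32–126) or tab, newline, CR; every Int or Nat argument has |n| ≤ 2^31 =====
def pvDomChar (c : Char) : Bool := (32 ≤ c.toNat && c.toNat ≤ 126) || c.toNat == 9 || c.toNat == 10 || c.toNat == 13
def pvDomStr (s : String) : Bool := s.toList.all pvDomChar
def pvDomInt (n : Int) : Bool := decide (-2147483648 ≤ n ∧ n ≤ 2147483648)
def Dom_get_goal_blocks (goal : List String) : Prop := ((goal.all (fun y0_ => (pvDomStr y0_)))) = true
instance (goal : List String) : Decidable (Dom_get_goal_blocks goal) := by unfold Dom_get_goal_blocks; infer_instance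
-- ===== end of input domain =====

-- B builds the result in three phases (distinct nonzero tiles via a seen-set, one grouping pass
-- over all tiles, then a comprehension over the collected keys) instead of A's one-pass dict
-- with membership branching; equivalence of the two groupings is proved below.

-- ===== PORT A =====
def get_goal_blocks (goal : List String) : List (String × List Int) :=
  ((PySem.List.enumerate goal).foldl
    (fun (d : PySem.Dict String (List Int)) (p : Int × String) =>
      if p.2 ≠ "0" then
        if d.contains p.2 then d.modify p.2 [] (fun v => v ++ [p.1])
        else if ¬ d.contains p.2 then d.insert p.2 [p.1]
        else d
      else d)
    PySem.Dict.empty).items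

-- ===== PORT B =====
def get_goal_blocks_alt (goal : List String) : List (String × List Int) :=
  -- first loop: state (keys, seen)
  let st := goal.foldl
    (fun (st : List String × PySem.Set String) (tile : String) =>
      if tile ≠ "0" ∧ ¬ PySem.Set.contains st.2 tile
      then (st.1 ++ [tile], PySem.Set.add st.2 tile) else st)
    ([], PySem.Set.empty)
  -- second loop: positions.setdefault(tile, []).append(i)  ≡  positions[tile] = positions.get(tile, []) + [i]
  let positions := (PySem.List.enumerate goal).foldl
    (fun (d : PySem.Dict String (List Int)) (p : Int × String) =>
      d.modify p.2 [] (fun v => v ++ [p.1]))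
    PySem.Dict.empty
  -- positions[tile] : present for every collected key, so the KeyError branch is unreachable
  st.1.map (fun tile => (tile, (positions.get? tile).getD []))

-- ===== PRECONDITION & SPEC =====
def Spec_get_goal_blocks (goal : List String) (out : List (String × List Int)) : Prop := out = get_goal_blocks_alt goal
instance (goal : List String) (out : List (String × List Int)) : Decidable (Spec_get_goal_blocks goal out) := by unfold Spec_get_goal_blocks; infer_instance

-- ===== CLAIM (what is proved, stated in full; the proofs are below) =====
def Claim_equal_get_goal_blocks : Prop := ∀ (goal : List String), Dom_get_goal_blocks goal → Spec_get_goal_blocks goal (get_goal_blocks goal)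

-- ===== LEMMAS AND PROOFS =====

-- A's loop over the enumerated list is a modify-append fold over the nonzero entries.
theorem foldA_eq (l : List (Int × String)) (d : PySem.Dict String (List Int)) :
    l.foldl (fun (d : PySem.Dict String (List Int)) (p : Int × String) =>
      if p.2 ≠ "0" then
        if d.contains p.2 then d.modify p.2 [] (fun v => v ++ [p.1])
        else if ¬ d.contains p.2 then d.insert p.2 [p.1]
        else d
      else d) d
    = (l.filter (fun p => p.2 != "0")).foldl
        (fun d p => d.modify p.2 [] (fun v => v ++ [p.1])) d := by
  induction l generalizing d with
  | nil => rfl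
  | cons p l ih =>
    simp only [List.foldl_cons, List.filter_cons]
    by_cases h0 : p.2 = "0"
    · rw [if_neg (c := p.2 ≠ "0") (fun h => h h0),
          if_neg (c := (p.2 != "0") = true) (by simp [h0])]
      exact ih d
    · by_cases hc : d.contains p.2 = true
      · rw [if_pos (c := p.2 ≠ "0") h0, if_pos (c := d.contains p.2 = true) hc,
            if_pos (c := (p.2 != "0") = true) (by simp [h0]), List.foldl_cons]
        exact ih _
      · have hmod : d.modify p.2 [] (fun v => v ++ [p.1]) = d.insert p.2 [p.1] := by
          simp [PySem.Dict.modify,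
            PySem.Dict.getD_of_not_contains d ([] : List Int) (by simpa using hc)]
        rw [if_pos (c := p.2 ≠ "0") h0, if_neg (c := d.contains p.2 = true) hc,
            if_pos (c := ¬ d.contains p.2 = true) hc,
            if_pos (c := (p.2 != "0") = true) (by simp [h0]), List.foldl_cons, hmod]
        exact ih _

-- B's (keys, seen) loop stays diagonal and its first component is a Set.add fold over the nonzero tiles.
theorem foldB_eq (l : List String) (ks : List String) :
    l.foldl (fun (st : List String × PySem.Set String) (tile : String) =>
      if tile ≠ "0" ∧ ¬ PySem.Set.contains st.2 tile
      then (st.1 ++ [tile], PySem.Set.add st.2 tile) else st) (ks, ks)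
    = ((l.filter (fun t => t != "0")).foldl PySem.Set.add ks,
       (l.filter (fun t => t != "0")).foldl PySem.Set.add ks) := by
  induction l generalizing ks with
  | nil => rfl
  | cons t l ih =>
    simp only [List.foldl_cons, List.filter_cons]
    by_cases h0 : t = "0"
    · rw [if_neg (c := t ≠ "0" ∧ ¬ PySem.Set.contains ks t = true) (by simp [h0]),
          if_neg (c := (t != "0") = true) (by simp [h0])]
      exact ih ks
    · by_cases hc : PySem.Set.contains ks t = true
      · have hm : t ∈ ks := by simpa [PySem.Set.contains] using hc
        have hadd : PySem.Set.add ks t = ks := by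
          simp [PySem.Set.add, PySem.Set.contains, hm]
        rw [if_neg (c := t ≠ "0" ∧ ¬ PySem.Set.contains ks t = true) (by simp [hm]),
            if_pos (c := (t != "0") = true) (by simp [h0]), List.foldl_cons, hadd]
        exact ih ks
      · have hm : t ∉ ks := by simpa [PySem.Set.contains] using hc
        have hadd : PySem.Set.add ks t = ks ++ [t] := by
          simp [PySem.Set.add, PySem.Set.contains, hm]
        rw [if_pos (c := t ≠ "0" ∧ ¬ PySem.Set.contains ks t = true) ⟨h0, by simp [hm]⟩,
            if_pos (c := (t != "0") = true) (by simp [h0]), List.foldl_cons, hadd]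
        exact ih _

-- A modify-append fold's lookup collects the first components of the matching pairs.
theorem getD_group (l : List (Int × String)) (c : String) :
    ((l.foldl (fun (d : PySem.Dict String (List Int)) (p : Int × String) =>
        d.modify p.2 [] (fun v => v ++ [p.1])) PySem.Dict.empty).getD c [])
    = (l.filter (fun p => p.2 == c)).map (fun p => p.1) := by
  have h1 : l.foldl (fun (d : PySem.Dict String (List Int)) p =>
        d.modify p.2 [] (fun v => v ++ [p.1])) PySem.Dict.empty
      = (l.map Prod.swap).foldl
        (fun (d : PySem.Dict String (List Int)) q => d.modify q.1 [] (fun v => v ++ [q.2]))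
        PySem.Dict.empty := by
    rw [List.foldl_map]
    rfl
  rw [h1, PySem.Dict.getD_foldl_modify_append]

  simp [List.filter_map, Function.comp_def]

theorem get_goal_blocks_spec : Claim_equal_get_goal_blocks := by
  intro goal _
  unfold Spec_get_goal_blocks get_goal_blocks get_goal_blocks_alt
  rw [foldA_eq]
  rw [show (PySem.Set.empty : PySem.Set String) = ([] : List String) from rfl, foldB_eq]
  rw [show (List.filter (fun t => t != "0") goal).foldl PySem.Set.add [] =
        PySem.Set.ofList (goal.filter (fun t => t != "0")) from
      (PySem.Set.ofList_eq_foldl _).symm]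
  set E := PySem.List.enumerate goal 0 with hE
  set F := E.filter (fun p => p.2 != "0") with hF
  set D := F.foldl (fun (d : PySem.Dict String (List Int)) p =>
      d.modify p.2 [] (fun v => v ++ [p.1])) PySem.Dict.empty with hD
  have hmapF : F.map (fun p => p.2) = goal.filter (fun t => t != "0") := by
    have h := List.filter_map (f := fun p : Int × String => p.2)
      (p := fun t : String => t != "0") (l := E)
    simp only [Function.comp_def] at h
    rw [hF, ← h, hE, PySem.List.map_snd_enumerate goal 0]
  have hkeysD : D.keys = PySem.Set.ofList (goal.filter (fun t => t != "0")) := by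
    rw [hD, PySem.Dict.keys_foldl_modify_key F (fun p => p.2) [] (fun _ p v => v ++ [p.1])]
    simp [PySem.Dict.keys_empty, PySem.Set.update, ← PySem.Set.ofList_eq_foldl, hmapF]
  have hnodup : D.keys.Nodup := by
    rw [hD]
    exact PySem.Dict.nodup_keys_foldl_modify_key F (fun p => p.2) [] (fun _ p v => v ++ [p.1])
      PySem.Dict.empty (by simp [PySem.Dict.keys_empty])
  rw [PySem.Dict.items_eq_map_keys D hnodup [], hkeysD]
  apply List.map_congr_left
  intro k hk
  have hk' : k ≠ "0" := by
    have := (PySem.Set.mem_ofList _ k).mp hk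
    simpa using (List.mem_filter.mp this).2
  rw [hD, getD_group F k, ← PySem.Dict.getD_eq_get?_getD, getD_group E k,
      hF, List.filter_filter]
  congr 1
  exact congrArg _ (List.filter_congr (fun p _ => by
    by_cases h : p.2 = k <;> simp [h, hk']))
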